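-- pv_equiv track=rewrite | github.com/AlessandroPiazza98/MasterThesis | Utils/Utils.py | count_matching_labels
-- ===== SOURCE A (Python) =====
-- def count_matching_labels(arr1, arr2, total_labels):
--     label_counts = {}
--     for label1, label2 in zip(arr1, arr2):
--         if label1 == label2:
--             if label1 in label_counts:
--                 label_counts[label1] += 1
--             else:
--                 label_counts[label1] = 1
--
--     label_occurrences = [label_counts.get(i, 0) for i in total_labels]
--     return label_occurrences
-- ===== SOURCE B (Python) =====
-- def count_matching_labels(arr1, arr2, total_labels):
--     return [sum(1 for a, b in zip(arr1, arr2) if a == b == lbl) for lbl in total_labels]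
-- ===== Notes on version B (the rewrite author's own statement) =====
-- stated objective: simpler
-- what changed: Drops the intermediate counting dict: B directly counts, for each requested label, the zipped positions where both arrays equal that label, as a one-line comprehension.
import Mathlib
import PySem

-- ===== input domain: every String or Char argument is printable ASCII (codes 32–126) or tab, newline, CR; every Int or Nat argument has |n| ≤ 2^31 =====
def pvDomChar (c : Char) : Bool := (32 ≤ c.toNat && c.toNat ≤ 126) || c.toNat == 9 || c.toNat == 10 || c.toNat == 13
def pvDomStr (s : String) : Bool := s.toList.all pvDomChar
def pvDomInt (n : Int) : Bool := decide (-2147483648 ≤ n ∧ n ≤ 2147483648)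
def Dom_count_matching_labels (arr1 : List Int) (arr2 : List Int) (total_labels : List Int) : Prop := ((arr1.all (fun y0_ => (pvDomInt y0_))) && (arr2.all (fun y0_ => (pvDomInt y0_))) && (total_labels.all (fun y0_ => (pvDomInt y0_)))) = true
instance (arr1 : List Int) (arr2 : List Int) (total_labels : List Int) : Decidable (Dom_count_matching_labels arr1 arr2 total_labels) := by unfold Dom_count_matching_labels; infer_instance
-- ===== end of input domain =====

-- B drops A's intermediate counting dict and counts matches per label directly (simpler; not faster).


-- ===== PORT A =====
-- body of A's loop: if label1 == label2: increment (or create) label_counts[label1]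
def cmlStep (d : PySem.Dict Int Int) (p : Int × Int) : PySem.Dict Int Int :=
  if p.1 == p.2 then
    if d.contains p.1 then d.insert p.1 (d.getD p.1 0 + 1) else d.insert p.1 1
  else d

def count_matching_labels (arr1 : List Int) (arr2 : List Int) (total_labels : List Int) : List Int :=
  let label_counts := (arr1.zip arr2).foldl cmlStep PySem.Dict.empty
  total_labels.map (fun i => label_counts.getD i 0)

-- ===== PORT B =====
def count_matching_labels_alt (arr1 : List Int) (arr2 : List Int) (total_labels : List Int) : List Int :=
  total_labels.map (fun lbl => ((arr1.zip arr2).countP (fun p => p.1 == p.2 && p.2 == lbl) : Int))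

-- ===== PRECONDITION & SPEC =====
def Spec_count_matching_labels (arr1 : List Int) (arr2 : List Int) (total_labels : List Int) (out : List Int) : Prop := out = count_matching_labels_alt arr1 arr2 total_labels
instance (arr1 : List Int) (arr2 : List Int) (total_labels : List Int) (out : List Int) : Decidable (Spec_count_matching_labels arr1 arr2 total_labels out) := by unfold Spec_count_matching_labels; infer_instance

-- ===== CLAIM (what is proved, stated in full; the proofs are below) =====
def Claim_equal_count_matching_labels : Prop := ∀ (arr1 : List Int) (arr2 : List Int) (total_labels : List Int), Dom_count_matching_labels arr1 arr2 total_labels → Spec_count_matching_labels arr1 arr2 total_labels (count_matching_labels arr1 arr2 total_labels)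

-- ===== LEMMAS AND PROOFS =====

theorem cml_fold_getD (ps : List (Int × Int)) (d : PySem.Dict Int Int) (v : Int) :
    (ps.foldl cmlStep d).getD v 0
      = d.getD v 0 + (ps.countP (fun p => p.1 == p.2 && p.2 == v) : Int) := by
  induction ps generalizing d with
  | nil => simp
  | cons p ps ih =>
    rw [List.foldl_cons, ih, List.countP_cons]
    have hstep : (cmlStep d p).getD v 0
        = d.getD v 0 + (if (p.1 == p.2 && p.2 == v) then 1 else 0) := by
      unfold cmlStep
      by_cases h12 : p.1 = p.2
      · simp only [h12, beq_self_eq_true, if_true, Bool.true_and]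
        by_cases hv : p.2 = v
        · subst hv
          by_cases hc : d.contains p.2
          · simp [hc, PySem.Dict.getD_insert_self]
          · simp only [hc, Bool.false_eq_true, if_false]
            rw [PySem.Dict.getD_insert_self,
              PySem.Dict.getD_of_not_contains d 0 (by simpa using hc)]
            simp
        · have hne : v ≠ p.2 := fun h => hv h.symm
          by_cases hc : d.contains p.2 <;>
            simp [hc, PySem.Dict.getD_insert_of_ne d _ _ hne, hv]
      · simp [h12]
    rw [hstep]
    push_cast
    ring

-- ===== VERDICT (by name: the statement is the Claim_ definition above) =====
theorem count_matching_labels_spec : Claim_equal_count_matching_labels := by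
  intro arr1 arr2 total_labels _
  unfold Spec_count_matching_labels count_matching_labels count_matching_labels_alt
  simp only []
  apply List.map_congr_left
  intro i _
  rw [cml_fold_getD]
  simp
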